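-- pv_equiv track=rewrite | github.com/necarlson97/Blender-Crude-TTS | crude-tts.py | get_segment_length
-- ===== SOURCE A (Python) =====
-- def get_segment_length(segment, duration_frames=1):
--     """
--     Given a segment string, and how many frames we want each
--     'letter' to take to say, return the total number of frames
--     this segment will last
--     - given that we pause longer on punctuation
--     """
--     frames = 0
--     for char in segment:
--         char = char.lower()
--         frames += duration_frames
--         if char in '.,!?':
--             frames += 5 * duration_frames
--     return frames
-- ===== SOURCE B (Python) =====
-- def get_segment_length(segment, duration_frames=1):
--     # staged: count each pause character with str.count, then one arithmetic formula
--     pauses = (segment.count('.') + segment.count(',')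
--               + segment.count('!') + segment.count('?'))
--     return duration_frames * (len(segment) + 5 * pauses)
-- ===== Notes on version B (the rewrite author's own statement) =====
-- stated objective: faster
-- what changed: Replaced A's per-character accumulating loop (with a per-char lower() and membership branch) by four staged str.count scans, one per pause character, combined in a single arithmetic formula duration_frames*(len + 5*pauses); no Python-level per-character loop or branch remains.
import Mathlib
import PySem

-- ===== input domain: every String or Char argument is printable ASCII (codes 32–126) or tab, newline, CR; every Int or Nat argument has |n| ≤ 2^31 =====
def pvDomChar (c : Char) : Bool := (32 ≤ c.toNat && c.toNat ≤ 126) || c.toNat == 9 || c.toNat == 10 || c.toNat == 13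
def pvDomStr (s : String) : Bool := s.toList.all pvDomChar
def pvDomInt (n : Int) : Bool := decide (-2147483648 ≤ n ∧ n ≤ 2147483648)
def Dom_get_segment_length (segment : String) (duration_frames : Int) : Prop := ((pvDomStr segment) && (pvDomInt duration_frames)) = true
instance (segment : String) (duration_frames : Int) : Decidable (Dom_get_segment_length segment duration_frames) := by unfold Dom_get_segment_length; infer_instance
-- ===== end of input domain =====

-- B replaces A's per-character accumulating loop by four str.count scans (one per pause
-- character) combined in one arithmetic formula; objective: faster (measured, constant-factor).

-- ===== PORT A =====
def get_segment_length (segment : String) (duration_frames : Int) : Int :=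
  segment.toList.foldl (fun frames char =>
    let char := PySem.Chars.lowerChar char
    let frames := frames + duration_frames
    if char ∈ ".,!?".toList then frames + 5 * duration_frames else frames) 0

-- ===== PORT B =====
def get_segment_length_alt (segment : String) (duration_frames : Int) : Int :=
  let pauses : Int := (PySem.Str.count segment "." : Int) + (PySem.Str.count segment "," : Int)
    + (PySem.Str.count segment "!" : Int) + (PySem.Str.count segment "?" : Int)
  duration_frames * (PySem.Str.len segment + 5 * pauses)

-- ===== PRECONDITION & SPEC =====
def Spec_get_segment_length (segment : String) (duration_frames : Int) (out : Int) : Prop := out = get_segment_length_alt segment duration_frames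
instance (segment : String) (duration_frames : Int) (out : Int) : Decidable (Spec_get_segment_length segment duration_frames out) := by unfold Spec_get_segment_length; infer_instance

-- ===== CLAIM =====
def Claim_equal_get_segment_length : Prop := ∀ (segment : String) (duration_frames : Int), Dom_get_segment_length segment duration_frames → Spec_get_segment_length segment duration_frames (get_segment_length segment duration_frames)

-- ===== LEMMAS AND PROOFS =====

-- lowering a character does not change whether it is one of '.,!?'
theorem lowerChar_mem_punct (c : Char) :
    (PySem.Chars.lowerChar c ∈ ".,!?".toList) ↔ (c ∈ ".,!?".toList) := by
  have hpl : ".,!?".toList = ['.', ',', '!', '?'] := by decide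
  rw [hpl]
  unfold PySem.Chars.lowerChar
  split_ifs with h
  · simp only [PySem.Chars.isupper, Bool.and_eq_true, decide_eq_true_eq] at h
    have hlo : 65 ≤ c.toNat := h.1
    have hhi : c.toNat ≤ 90 := h.2
    have hval : (Char.ofNat (c.toNat + 32)).toNat = c.toNat + 32 := by
      rw [Char.toNat_ofNat, if_pos (Or.inl (by omega))]
    constructor
    · intro hm
      exfalso
      simp only [List.mem_cons, List.not_mem_nil, or_false] at hm
      rcases hm with hm | hm | hm | hm <;>
        · have h2 := congrArg Char.toNat hm
          rw [hval] at h2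
          simp only [show ('.' : Char).toNat = 46 from by decide,
            show (',' : Char).toNat = 44 from by decide,
            show ('!' : Char).toNat = 33 from by decide,
            show ('?' : Char).toNat = 63 from by decide] at h2
          omega
    · intro hm
      exfalso
      simp only [List.mem_cons, List.not_mem_nil, or_false] at hm
      rcases hm with hm | hm | hm | hm <;>
        · subst hm; exact absurd hlo (by decide)
  · exact Iff.rfl

-- A's fold in closed form over countP
theorem foldA_eq (d : Int) (l : List Char) (a : Int) :
    l.foldl (fun frames char =>
      let char := PySem.Chars.lowerChar char
      let frames := frames + d
      if char ∈ ".,!?".toList then frames + 5 * d else frames) a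
    = a + (l.length : Int) * d + 5 * d * (l.countP (fun c => c ∈ ".,!?".toList) : Int) := by
  induction l generalizing a with
  | nil => simp
  | cons c l ih =>
    rw [List.foldl_cons, ih]
    by_cases hc : c ∈ ".,!?".toList
    · simp only [List.countP_cons, List.length_cons, hc, decide_true,
        if_pos ((lowerChar_mem_punct c).mpr hc)]
      push_cast
      ring
    · simp only [List.countP_cons, List.length_cons, hc, decide_false,
        if_neg (fun hx => hc ((lowerChar_mem_punct c).mp hx))]
      push_cast
      ring

-- Python's str.count for a single-character needle is List.count
theorem countGo_single (c : Char) (l : List Char) :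
    ∀ (fuel acc : Nat), l.length ≤ fuel →
      PySem.Chars.count.go [c] fuel l acc = acc + l.count c := by
  induction l with
  | nil =>
    intro fuel acc _
    cases fuel <;> simp [PySem.Chars.count.go]
  | cons h t ih =>
    intro fuel acc hf
    cases fuel with
    | zero => simp at hf
    | succ n =>
      rw [PySem.Chars.count.go]
      by_cases hch : c = h
      · have hpre : List.isPrefixOf [c] (h :: t) = true := by
          simp [List.isPrefixOf, hch]
        rw [if_pos hpre]
        have hdrop : List.drop [c].length (h :: t) = t := by simp
        rw [hdrop, ih n (acc + 1) (by simp at hf; omega)]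
        simp [List.count_cons, hch, eq_comm]
        omega
      · have hcb : (c == h) = false := beq_eq_false_iff_ne.mpr hch
        have hpre : List.isPrefixOf [c] (h :: t) = false := by
          simp [List.isPrefixOf, hcb]
        rw [if_neg (by simp [hpre])]
        rw [ih n acc (by simp at hf; omega)]
        have hne : (h == c) = false := beq_eq_false_iff_ne.mpr (fun e => hch e.symm)
        simp [List.count_cons, hne]

theorem count_single (s : String) (c : Char) :
    PySem.Str.count s (String.ofList [c]) = s.toList.count c := by
  have : PySem.Str.count s (String.ofList [c]) = PySem.Chars.count s.toList [c] := by
    simp [PySem.Str.count, String.toList_ofList]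
  rw [this]
  unfold PySem.Chars.count
  simp only [List.isEmpty_cons, if_false, Bool.false_eq_true]
  simpa using countGo_single c s.toList s.toList.length 0 (le_refl _)

-- countP over the four punctuation chars splits into four List.counts
theorem countP_punct (l : List Char) :
    l.countP (fun c => c ∈ ".,!?".toList)
      = l.count '.' + l.count ',' + l.count '!' + l.count '?' := by
  induction l with
  | nil => simp
  | cons c l ih =>
    simp only [List.countP_cons, List.count_cons, ih]
    by_cases h : c ∈ ".,!?".toList
    · have : c = '.' ∨ c = ',' ∨ c = '!' ∨ c = '?' := by
        have : ".,!?".toList = ['.', ',', '!', '?'] := by decide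
        rw [this] at h; simpa using h
      rcases this with h1 | h1 | h1 | h1 <;> subst h1 <;> simp <;> omega
    · have hl : ".,!?".toList = ['.', ',', '!', '?'] := by decide
      rw [hl] at h
      simp only [List.mem_cons, List.not_mem_nil, or_false, not_or] at h
      obtain ⟨h1, h2, h3, h4⟩ := h
      simp [hl, beq_iff_eq, h1, h2, h3, h4, Ne.symm h1, Ne.symm h2, Ne.symm h3, Ne.symm h4]

-- ===== VERDICT =====
theorem get_segment_length_spec : Claim_equal_get_segment_length := by
  intro segment duration_frames _
  unfold Spec_get_segment_length get_segment_length get_segment_length_alt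
  rw [foldA_eq]
  have h1 : ("." : String) = String.ofList ['.'] := rfl
  have h2 : ("," : String) = String.ofList [','] := rfl
  have h3 : ("!" : String) = String.ofList ['!'] := rfl
  have h4 : ("?" : String) = String.ofList ['?'] := rfl
  rw [h1, h2, h3, h4, count_single, count_single, count_single, count_single,
    countP_punct]
  simp [PySem.Str.len]
  push_cast
  ring
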